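-- pv_equiv track=rewrite | github.com/tomas-skalicky/interview_puzzles | src/main/python/com/skalicky/python/interviewpuzzles/find_k_closest_elements.py | closest_nums
-- ===== SOURCE A (Python) =====
-- from typing import List, Dict
--
-- def closest_nums(nums: List[int], k: int, x: int) -> List[int]:
--     if len(nums) < k:
--         raise RuntimeError('There is not enough elements in {} to return {} elements.'.format(nums, k))
--     else:
--         number_lists_by_distances: Dict[int, List[int]] = {}
--         distances: List[int] = []
--         for number in nums:
--             distance: int = abs(x - number)
--             if distances.__contains__(distance):
--                 number_lists_by_distances[distance].append(number)
--             else: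
--                 distances.append(distance)
--                 number_lists_by_distances[distance] = [number]
--
--         sorted_distances: List[int] = sorted(distances)
--         selected_numbers: List[int] = []
--         for distance in sorted_distances:
--             numbers_in_distance: List[int] = number_lists_by_distances[distance]
--             sublist_size: int = min(k - len(selected_numbers), len(numbers_in_distance))
--             selected_numbers += numbers_in_distance[0:sublist_size]
--             if len(selected_numbers) == k:
--                 return selected_numbers
--         raise RuntimeError('Unreachable code')
-- ===== SOURCE B (Python) =====
-- from typing import List
--
--
-- def closest_nums(nums: List[int], k: int, x: int) -> List[int]:
--     if len(nums) < k:
--         raise RuntimeError('There is not enough elements in {} to return {} elements.'.format(nums, k))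
--     return sorted(nums, key=lambda n: abs(x - n))[:k]
-- ===== Notes on version B (the rewrite author's own statement) =====
-- stated objective: faster
-- what changed: Replaces the dict-of-buckets keyed by distance, the separate first-occurrence distance list (membership-tested by linear scan per element), and the accumulation loop with early return by a single stable sort of nums keyed by distance to x, sliced to k (stability reproduces A's tie order).
import Mathlib
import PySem

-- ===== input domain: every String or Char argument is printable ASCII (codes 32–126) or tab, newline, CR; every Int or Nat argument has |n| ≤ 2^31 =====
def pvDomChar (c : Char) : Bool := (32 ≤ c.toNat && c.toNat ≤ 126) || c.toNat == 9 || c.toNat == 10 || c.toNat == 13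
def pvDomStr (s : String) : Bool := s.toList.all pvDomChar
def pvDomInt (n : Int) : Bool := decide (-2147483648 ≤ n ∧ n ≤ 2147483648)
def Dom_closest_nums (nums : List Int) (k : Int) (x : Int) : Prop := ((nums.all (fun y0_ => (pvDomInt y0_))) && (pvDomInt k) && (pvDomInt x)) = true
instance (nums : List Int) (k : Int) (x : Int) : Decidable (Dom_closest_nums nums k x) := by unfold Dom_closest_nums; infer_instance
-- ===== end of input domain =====

-- B replaces A's dict-of-buckets + linearly-scanned distance list + accumulation loop by one
-- stable sort keyed by distance to x, sliced to k (objective: faster; measured).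

-- ===== PORT A =====
-- second loop of A: 'for distance in sorted_distances: … if len(selected)==k: return selected';
-- the fall-through 'raise RuntimeError("Unreachable code")' (excluded by Pre_) returns sel here.
def closestLoop (k : Int) (dct : PySem.Dict Int (List Int)) : List Int → List Int → List Int
  | [], sel => sel
  | distance :: rest, sel =>
      -- 'number_lists_by_distances[distance]': the key is always present here, so getD is exact
      let numbers := dct.getD distance []
      let sublist_size : Int := min (k - (sel.length : Int)) (numbers.length : Int)
      let sel' := sel ++ PySem.List.slice numbers (some 0) (some sublist_size)
      if (sel'.length : Int) = k then sel' else closestLoop k dct rest sel'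

def closest_nums (nums : List Int) (k : Int) (x : Int) : List Int :=
  if (nums.length : Int) < k then []  -- Python raises RuntimeError here (outside Pre_)
  else
    let st := nums.foldl (fun (st : PySem.Dict Int (List Int) × List Int) number =>
        let distance : Int := |x - number|
        if st.2.contains distance then
          (st.1.modify distance [] (· ++ [number]), st.2)
        else
          (st.1.insert distance [number], st.2 ++ [distance]))
      (PySem.Dict.empty, [])
    let sorted_distances := PySem.List.sorted st.2 (fun v => v) false
    closestLoop k st.1 sorted_distances []

-- ===== PORT B =====
def closest_nums_alt (nums : List Int) (k : Int) (x : Int) : List Int :=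
  if (nums.length : Int) < k then []  -- Python raises RuntimeError here (outside Pre_)
  else PySem.List.slice (PySem.List.sorted nums (fun n => |x - n|) false) none (some k)

-- ===== PRECONDITION & SPEC =====
-- Pre_ excludes exactly the inputs on which A raises: k > len(nums) (explicit RuntimeError),
-- and k < 0 or (k = 0 with empty nums), where the second loop falls through to
-- raise RuntimeError('Unreachable code').
def Pre_closest_nums (nums : List Int) (k : Int) (x : Int) : Prop :=
  0 ≤ k ∧ k ≤ (nums.length : Int) ∧ nums ≠ []
instance (nums : List Int) (k : Int) (x : Int) : Decidable (Pre_closest_nums nums k x) := by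
  unfold Pre_closest_nums; infer_instance

def pvWitness_closest_nums : List Int × Int × Int := ([3, 1, 4], 2, 2)

def Spec_closest_nums (nums : List Int) (k : Int) (x : Int) (out : List Int) : Prop := out = closest_nums_alt nums k x
instance (nums : List Int) (k : Int) (x : Int) (out : List Int) : Decidable (Spec_closest_nums nums k x out) := by unfold Spec_closest_nums; infer_instance

-- ===== CLAIM (what is proved, stated in full; the proofs are below) =====
def Claim_equal_closest_nums : Prop := ∀ (nums : List Int) (k : Int) (x : Int), Dom_closest_nums nums k x → Pre_closest_nums nums k x → Spec_closest_nums nums k x (closest_nums nums k x)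

-- ===== LEMMAS AND PROOFS =====

theorem foldA_state (keyf : Int → Int) :
    ∀ (l : List Int) (d : PySem.Dict Int (List Int)) (s : List Int),
      (∀ c, d.contains c = true ↔ c ∈ s) →
      (l.foldl (fun st number =>
          if st.2.contains (keyf number) then
            (st.1.modify (keyf number) [] (· ++ [number]), st.2)
          else
            (st.1.insert (keyf number) [number], st.2 ++ [keyf number])) (d, s)).2
        = PySem.Set.update s (l.map keyf)
      ∧ (∀ c, (l.foldl (fun st number =>
          if st.2.contains (keyf number) then
            (st.1.modify (keyf number) [] (· ++ [number]), st.2)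
          else
            (st.1.insert (keyf number) [number], st.2 ++ [keyf number])) (d, s)).1.getD c []
          = d.getD c [] ++ l.filter (fun n => keyf n == c)) := by
  intro l
  induction l with
  | nil => intro d s h; simp [PySem.Set.update]
  | cons n t ih =>
    intro d s h
    simp only [List.foldl_cons, List.map_cons, List.filter_cons]
    by_cases hmem : keyf n ∈ s
    · have hcont : s.contains (keyf n) = true := by
        simpa using hmem
      rw [hcont]
      simp only [if_true]
      have h' : ∀ c, (d.modify (keyf n) [] (· ++ [n])).contains c = true ↔ c ∈ s := by
        intro c
        rw [PySem.Dict.contains_modify]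
        constructor
        · intro hc
          rcases Bool.or_eq_true_iff.mp hc with hc | hc
          · exact (beq_iff_eq.mp hc) ▸ hmem
          · exact (h c).mp hc
        · intro hc
          exact Bool.or_eq_true_iff.mpr (Or.inr ((h c).mpr hc))
      obtain ⟨h1, h2⟩ := ih (d.modify (keyf n) [] (· ++ [n])) s h'
      refine ⟨?_, ?_⟩
      · rw [h1, PySem.Set.update_cons, PySem.Set.add_of_mem hmem]
      · intro c
        rw [h2 c, PySem.Dict.getD_modify]
        by_cases hc : keyf n = c
        · subst hc; simp
        · simp [hc, Ne.symm hc]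
    · have hcont : s.contains (keyf n) = false := by
        simp only [List.contains_eq_mem]; simpa using hmem
      rw [hcont]
      simp only [Bool.false_eq_true, if_false]
      have h' : ∀ c, (d.insert (keyf n) [n]).contains c = true ↔ c ∈ s ++ [keyf n] := by
        intro c
        rw [PySem.Dict.contains_insert]
        simp only [List.mem_append, List.mem_singleton]
        constructor
        · intro hc
          rcases Bool.or_eq_true_iff.mp hc with hc | hc
          · exact Or.inr (beq_iff_eq.mp hc)
          · exact Or.inl ((h c).mp hc)
        · rintro (hc | hc)
          · exact Bool.or_eq_true_iff.mpr (Or.inr ((h c).mpr hc))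
          · exact Bool.or_eq_true_iff.mpr (Or.inl (beq_iff_eq.mpr hc))
      obtain ⟨h1, h2⟩ := ih (d.insert (keyf n) [n]) (s ++ [keyf n]) h'
      refine ⟨?_, ?_⟩
      · rw [h1, PySem.Set.update_cons, PySem.Set.add_of_not_mem hmem]
      · intro c
        rw [h2 c, PySem.Dict.getD_insert]
        have hd : d.getD (keyf n) [] = [] := by
          apply PySem.Dict.getD_of_not_contains
          by_contra hcc
          exact hmem ((h (keyf n)).mp (by revert hcc; cases hcc2 : d.contains (keyf n) <;> simp))
        by_cases hc : keyf n = c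
        · subst hc; simp [hd]
        · simp [hc, Ne.symm hc]

theorem insertBy_append (before : Int → Int → Bool) (a : Int) :
    ∀ (L1 L2 : List Int), (∀ y ∈ L1, before a y = false) → (∀ y ∈ L2, before a y = true) →
      PySem.List.insertBy before a (L1 ++ L2) = L1 ++ a :: L2 := by
  intro L1
  induction L1 with
  | nil =>
    intro L2 _ h2
    cases L2 with
    | nil => simp [PySem.List.insertBy]
    | cons y t => simp [PySem.List.insertBy, h2 y (by simp)]
  | cons z t ih =>
    intro L2 h1 h2
    simp only [List.cons_append, PySem.List.insertBy, h1 z (by simp), Bool.false_eq_true, if_false]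
    rw [ih L2 (fun y hy => h1 y (by simp [hy])) h2]

theorem split_sorted_mem : ∀ {ds : List Int}, ds.Pairwise (· < ·) → ∀ {c : Int}, c ∈ ds →
    ∃ D1 D2, ds = D1 ++ c :: D2 ∧ (∀ y ∈ D1, y < c) ∧ (∀ y ∈ D2, c < y) := by
  intro ds
  induction ds with
  | nil => intro _ c hc; simp at hc
  | cons z t ih =>
    intro hp c hc
    rcases List.mem_cons.mp hc with hceq | hmt
    · exact ⟨[], t, by simp [hceq], by simp, fun y hy => hceq ▸ (List.pairwise_cons.mp hp).1 y hy⟩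
    · obtain ⟨D1, D2, he, hl, hr⟩ := ih (List.pairwise_cons.mp hp).2 hmt
      refine ⟨z :: D1, D2, by simp [he], ?_, hr⟩
      intro y hy
      rcases List.mem_cons.mp hy with hy | hy
      · exact hy ▸ (List.pairwise_cons.mp hp).1 c hmt
      · exact hl y hy

theorem insertBy_sorted_not_mem : ∀ {ds : List Int}, ds.Pairwise (· < ·) → ∀ {c : Int}, c ∉ ds →
    ∃ D1 D2, ds = D1 ++ D2 ∧
      PySem.List.insertBy (fun a b => decide (a < b)) c ds = D1 ++ c :: D2 ∧
      (∀ y ∈ D1, y < c) ∧ (∀ y ∈ D2, c < y) := by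
  intro ds
  induction ds with
  | nil => intro _ c _; exact ⟨[], [], by simp, by simp [PySem.List.insertBy], by simp, by simp⟩
  | cons z t ih =>
    intro hp c hc
    by_cases hcz : c < z
    · refine ⟨[], z :: t, by simp, ?_, by simp, ?_⟩
      · simp [PySem.List.insertBy, hcz]
      · intro y hy
        rcases List.mem_cons.mp hy with hy | hy
        · exact hy ▸ hcz
        · exact lt_trans hcz ((List.pairwise_cons.mp hp).1 y hy)
    · have hzc : z < c := by
        rcases lt_or_eq_of_le (not_lt.mp hcz) with h | h
        · exact h
        · exact absurd h.symm (fun he => hc (he ▸ List.mem_cons_self))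
      obtain ⟨D1, D2, he, hi, hl, hr⟩ := ih (List.pairwise_cons.mp hp).2 (fun h => hc (List.mem_cons_of_mem z h))
      refine ⟨z :: D1, D2, by simp [he], ?_, ?_, hr⟩
      · simp [PySem.List.insertBy, not_lt.mpr (le_of_lt hzc), hi]
      · intro y hy
        rcases List.mem_cons.mp hy with hy | hy
        · exact hy ▸ hzc
        · exact hl y hy

theorem flatMap_no_c (f : Int → List Int) (c : Int) (e : List Int) :
    ∀ (D : List Int), (∀ d ∈ D, d ≠ c) →
      D.flatMap (fun d => f d ++ if c = d then e else []) = D.flatMap f := by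
  intro D hD
  induction D with
  | nil => simp
  | cons z t ih =>
    simp only [List.flatMap_cons, if_neg (Ne.symm (hD z List.mem_cons_self)), List.append_nil]
    rw [ih (fun d hd => hD d (List.mem_cons_of_mem z hd))]

theorem sorted_eq_flatMap_filter (keyf : Int → Int) (xs : List Int) :
    PySem.List.sorted xs keyf false
      = (PySem.List.sorted (PySem.Set.ofList (xs.map keyf)) (fun v => v) false).flatMap
          (fun d => xs.filter (fun n => keyf n == d)) := by
  induction xs using List.reverseRecOn with
  | nil => simp [PySem.List.sorted_eq_foldl_insertBy]
  | append_singleton xs a ih =>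
    have hL : PySem.List.sorted (xs ++ [a]) keyf false
        = PySem.List.insertBy (fun p q => decide (keyf p < keyf q)) a (PySem.List.sorted xs keyf false) := by
      rw [PySem.List.sorted_eq_foldl_insertBy, List.foldl_append, List.foldl_cons, List.foldl_nil,
        ← PySem.List.sorted_eq_foldl_insertBy]
    set c := keyf a with hc
    set f : Int → List Int := fun d => xs.filter (fun n => keyf n == d) with hf
    have hfkey : ∀ d y, y ∈ f d → keyf y = d := by
      intro d y hy
      have := List.of_mem_filter hy
      simpa using this
    have hpds : (PySem.List.sorted (PySem.Set.ofList (xs.map keyf)) (fun v => v) false).Pairwise (· < ·) :=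
      PySem.List.sorted_ofList_pairwise_lt _
    set ds := PySem.List.sorted (PySem.Set.ofList (xs.map keyf)) (fun v => v) false with hds
    have hmds : ∀ d, d ∈ ds ↔ d ∈ xs.map keyf := by
      intro d
      rw [hds, PySem.List.mem_sorted, PySem.Set.mem_ofList]
    have hfilter_app : ∀ d, (xs ++ [a]).filter (fun n => keyf n == d)
        = f d ++ (if c = d then [a] else []) := by
      intro d
      rw [List.filter_append]
      congr 1
      by_cases h : c = d
      · have hb : (keyf a == d) = true := by simpa [← hc] using h
        simp [List.filter, hb, h]
      · have hb : (keyf a == d) = false := by simpa [← hc] using h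
        simp [List.filter, hb, h]
    by_cases hcm : c ∈ xs.map keyf
    · -- existing key value: the distinct sorted key list is unchanged, a joins its fibre
      have hds' : PySem.Set.ofList ((xs ++ [a]).map keyf) = PySem.Set.ofList (xs.map keyf) := by
        rw [List.map_append, List.map_singleton, PySem.Set.ofList_append_singleton,
          PySem.Set.add_of_mem (by rw [PySem.Set.mem_ofList]; exact hcm)]
      obtain ⟨D1, D2, hsplit, hl, hr⟩ := split_sorted_mem hpds ((hmds c).mpr hcm)
      rw [hL, ih, hds', ← hds, hsplit]
      have e1 : (D1 ++ c :: D2).flatMap f = (D1.flatMap f ++ f c) ++ D2.flatMap f := by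
        simp [List.flatMap_append]
      rw [e1, insertBy_append (fun p q => decide (keyf p < keyf q)) a
        (D1.flatMap f ++ f c) (D2.flatMap f) ?_ ?_]
      · simp only [hfilter_app, List.flatMap_append, List.flatMap_cons]
        rw [flatMap_no_c f c [a] D1 (fun d hd => ne_of_lt (hl d hd)),
          flatMap_no_c f c [a] D2 (fun d hd => ne_of_gt (hr d hd))]
        simp
      · intro y hy
        rcases List.mem_append.mp hy with hy | hy
        · obtain ⟨d, hd, hyd⟩ := List.mem_flatMap.mp hy
          have hk : keyf y = d := hfkey d y hyd
          simp [hk, ← hc, not_lt.mpr (le_of_lt (hl d hd))]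
        · have hk : keyf y = c := hfkey c y hy
          simp [hk, ← hc]
      · intro y hy
        obtain ⟨d, hd, hyd⟩ := List.mem_flatMap.mp hy
        have hk : keyf y = d := hfkey d y hyd
        simp [hk, ← hc, hr d hd]
    · -- fresh key value: it is inserted among the distinct keys, with fibre [a]
      have hds' : PySem.Set.ofList ((xs ++ [a]).map keyf) = PySem.Set.ofList (xs.map keyf) ++ [c] := by
        rw [List.map_append, List.map_singleton, PySem.Set.ofList_append_singleton,
          PySem.Set.add_of_not_mem (by rw [PySem.Set.mem_ofList]; exact hcm)]
      have hcds : c ∉ ds := fun h => hcm ((hmds c).mp h)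
      obtain ⟨D1, D2, hsplit, hins, hl, hr⟩ := insertBy_sorted_not_mem hpds hcds
      have hsorted' : PySem.List.sorted (PySem.Set.ofList (xs.map keyf) ++ [c]) (fun v => v) false
          = PySem.List.insertBy (fun a b => decide (a < b)) c ds := by
        rw [PySem.List.sorted_eq_foldl_insertBy, List.foldl_append, List.foldl_cons, List.foldl_nil,
          ← PySem.List.sorted_eq_foldl_insertBy]
      have hfc : f c = [] := by
        rw [hf]
        apply List.filter_eq_nil_iff.mpr
        intro n hn hb
        exact hcm (by
          have : keyf n = c := by simpa using hb
          exact this ▸ List.mem_map_of_mem hn)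
      rw [hL, ih, hds', hsorted', hins, hsplit]
      have e1 : (D1 ++ D2).flatMap f = D1.flatMap f ++ D2.flatMap f := by
        simp [List.flatMap_append]
      rw [e1, insertBy_append (fun p q => decide (keyf p < keyf q)) a
        (D1.flatMap f) (D2.flatMap f) ?_ ?_]
      · simp only [hfilter_app, List.flatMap_append, List.flatMap_cons]
        rw [flatMap_no_c f c [a] D1 (fun d hd => ne_of_lt (hl d hd)),
          flatMap_no_c f c [a] D2 (fun d hd => ne_of_gt (hr d hd)), hfc]
        simp
      · intro y hy
        obtain ⟨d, hd, hyd⟩ := List.mem_flatMap.mp hy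
        have hk : keyf y = d := hfkey d y hyd
        simp [hk, ← hc, not_lt.mpr (le_of_lt (hl d hd))]
      · intro y hy
        obtain ⟨d, hd, hyd⟩ := List.mem_flatMap.mp hy
        have hk : keyf y = d := hfkey d y hyd
        simp [hk, ← hc, hr d hd]

theorem closestLoop_eq_take (k : Int) (dct : PySem.Dict Int (List Int)) :
    ∀ (ds sel : List Int), (sel.length : Int) ≤ k →
      k ≤ (sel.length : Int) + ((ds.flatMap (fun d => dct.getD d [])).length : Int) →
      closestLoop k dct ds sel = sel ++ (ds.flatMap (fun d => dct.getD d [])).take (k - sel.length).toNat := by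
  intro ds
  induction ds with
  | nil =>
    intro sel h1 h2
    simp only [List.flatMap_nil, List.length_nil] at h2 ⊢
    have : (k - (sel.length : Int)).toNat = 0 := by omega
    simp [closestLoop, this]
  | cons dist rest ih =>
    intro sel h1 h2
    simp only [List.flatMap_cons, List.length_append, List.flatMap_cons] at h2 ⊢
    set numbers := dct.getD dist [] with hnum
    have hnn : (0 : Int) ≤ min (k - (sel.length : Int)) (numbers.length : Int) := by
      push_cast at h2 ⊢; omega
    set m := (min (k - (sel.length : Int)) (numbers.length : Int)).toNat with hm
    have hcast : min (k - (sel.length : Int)) (numbers.length : Int) = (m : Int) := by omega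
    have hslice : PySem.List.slice numbers (some 0)
        (some (min (k - (sel.length : Int)) (numbers.length : Int))) = numbers.take m := by
      rw [hcast]
      rw [show ((0:Int) = ((0:Nat) : Int)) from rfl, PySem.List.slice_natCast]
      simp
    have hmle : m ≤ numbers.length := by omega
    show (if ((sel ++ PySem.List.slice numbers (some 0) (some (min (k - (sel.length : Int)) (numbers.length : Int)))).length : Int) = k then _ else _) = _
    rw [hslice]
    have hlen' : (sel ++ numbers.take m).length = sel.length + m := by
      simp [List.length_take, Nat.min_eq_left hmle]
    by_cases hk : ((sel ++ numbers.take m).length : Int) = k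
    · rw [if_pos hk]
      have hmk : m = (k - (sel.length : Int)).toNat := by
        rw [hlen'] at hk; push_cast at hk; omega
      rw [List.take_append]
      have h5 : (k - (sel.length : Int)).toNat = m := by omega
      rw [h5]
      have h6 : m - numbers.length = 0 := by omega
      rw [h6, List.take_zero, List.append_nil]
    · rw [if_neg hk]
      have hstrict : (numbers.length : Int) < k - (sel.length : Int) := by
        rw [hlen'] at hk; push_cast at hk; omega
      have hmall : m = numbers.length := by omega
      have htake : numbers.take m = numbers := by rw [hmall, List.take_length]
      rw [htake] at hk ⊢
      rw [ih (sel ++ numbers) (by rw [List.length_append]; push_cast; omega)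
        (by rw [List.length_append]; push_cast at h2 ⊢; omega)]
      rw [List.take_append]
      have h3 : (k - ((sel ++ numbers).length : Int)).toNat
          = (k - (sel.length : Int)).toNat - numbers.length := by
        simp only [List.length_append]; push_cast; omega
      have h4 : numbers.take (k - (sel.length : Int)).toNat = numbers := by
        apply List.take_of_length_le; omega
      rw [h3, h4]
      simp


-- ===== VERDICT (by name: the statement is the Claim_ definition above) =====
theorem closest_nums_spec : Claim_equal_closest_nums := by
  intro nums k x _ hpre
  obtain ⟨hk0, hkn, hne⟩ := hpre
  unfold Spec_closest_nums closest_nums closest_nums_alt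
  rw [if_neg (not_lt.mpr hkn), if_neg (not_lt.mpr hkn)]
  obtain ⟨h1, h2⟩ := foldA_state (fun n => |x - n|) nums PySem.Dict.empty []
    (by intro c; simp [PySem.Dict.contains_empty])
  simp only []
  rw [h1, PySem.Set.update_nil_left]
  have hgetD : ∀ c, (nums.foldl (fun st number =>
      if st.2.contains (|x - number|) then
        (st.1.modify (|x - number|) [] (· ++ [number]), st.2)
      else
        (st.1.insert (|x - number|) [number], st.2 ++ [|x - number|])) (PySem.Dict.empty, [])).1.getD c []
      = nums.filter (fun n => (|x - n|) == c) := by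
    intro c
    rw [h2 c, PySem.Dict.getD_empty, List.nil_append]
  have hflat : ((PySem.List.sorted (PySem.Set.ofList (nums.map (fun n => |x - n|))) (fun v => v) false).flatMap
      (fun d => (nums.foldl (fun st number =>
        if st.2.contains (|x - number|) then
          (st.1.modify (|x - number|) [] (· ++ [number]), st.2)
        else
          (st.1.insert (|x - number|) [number], st.2 ++ [|x - number|])) (PySem.Dict.empty, [])).1.getD d []))
      = PySem.List.sorted nums (fun n => |x - n|) false := by
    simp only [hgetD]
    rw [← sorted_eq_flatMap_filter]
  rw [closestLoop_eq_take k _ _ [] (by simpa using hk0)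
    (by rw [hflat]; simp [PySem.List.length_sorted]; omega)]
  rw [hflat]
  have hkcast : k = ((k.toNat : Nat) : Int) := by omega
  rw [hkcast, PySem.List.slice_to_natCast]
  simp
  omega
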